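-- pv_equiv track=rewrite | github.com/ThomasJohnstone8/4103_Assignment2-AdventureGame | adventureGame.py | dfs
-- ===== SOURCE A (Python) =====
-- gridSize = 5
--
-- directionOptions = [(-1, 0), (1, 0), (0, -1), (0, 1)]  # (up, down, left, right)
--
-- def dfs(grid, start):
--     stack = [start]
--     visited = set()
--     while stack:
--         x, y = stack.pop()
--         if (x, y) in visited:
--             continue
--         visited.add((x, y))
--         for dx, dy in directionOptions:
--             nx, ny = x + dx, y + dy
--             if 0 <= nx < gridSize and 0 <= ny < gridSize:
--                 if grid[nx][ny] not in ['O']:  # Can’t move through obstacles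
--                     stack.append((nx, ny))
--     return visited
-- ===== SOURCE B (Python) =====
-- gridSize = 5
--
-- directionOptions = [(-1, 0), (1, 0), (0, -1), (0, 1)]  # (up, down, left, right)
--
-- def dfs(grid, start):
--     # Recursive flood fill: an admissibility test ok() plus four explicitly
--     # unrolled recursive calls, in the order a LIFO stack would serve the
--     # pushed neighbours (right, left, down, up).  The returned set does not
--     # depend on the exploration order.
--     visited = set()
--
--     def ok(x, y):
--         return 0 <= x < gridSize and 0 <= y < gridSize and grid[x][y] != 'O'
--
--     def fill(x, y):
--         if (x, y) not in visited:
--             visited.add((x, y))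
--             if ok(x, y + 1):
--                 fill(x, y + 1)
--             if ok(x, y - 1):
--                 fill(x, y - 1)
--             if ok(x + 1, y):
--                 fill(x + 1, y)
--             if ok(x - 1, y):
--                 fill(x - 1, y)
--
--     fill(*start)
--     return visited
-- ===== Notes on version B (the rewrite author's own statement) =====
-- stated objective: alternative
-- what changed: The explicit stack + while-loop DFS with a pop-time visited check is replaced by a recursive flood-fill helper that marks a cell on entry and makes four explicitly unrolled recursive calls guarded by an admissibility predicate ok(x,y); no stack, no loop over the direction list.
-- outside the precondition, e.g. on dfs([['O', 'O'], ['O', 'O']], (0, 0)): A returns {(0, 0)}, B returns {(0, 0)}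
import Mathlib
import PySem

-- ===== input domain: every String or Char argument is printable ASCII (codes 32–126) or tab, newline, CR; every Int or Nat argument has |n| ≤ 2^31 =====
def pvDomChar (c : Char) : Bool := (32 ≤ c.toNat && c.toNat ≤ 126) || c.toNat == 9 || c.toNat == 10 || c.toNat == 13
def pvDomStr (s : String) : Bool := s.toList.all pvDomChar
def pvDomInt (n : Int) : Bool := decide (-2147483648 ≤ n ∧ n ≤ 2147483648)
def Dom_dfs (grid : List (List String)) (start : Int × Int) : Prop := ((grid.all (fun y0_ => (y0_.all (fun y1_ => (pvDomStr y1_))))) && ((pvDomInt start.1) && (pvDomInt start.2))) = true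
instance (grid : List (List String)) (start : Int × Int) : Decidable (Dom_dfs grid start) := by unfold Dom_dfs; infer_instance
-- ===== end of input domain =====

-- B replaces the explicit stack + while-loop DFS by a recursive flood fill with an
-- admissibility helper and four unrolled recursive calls (an alternative decomposition,
-- same cost); return values agree on Pre_.

-- ===== PORT A =====
-- module constant directionOptions of A
def pvDirections : List (Int × Int) := [(-1, 0), (1, 0), (0, -1), (0, 1)]

-- the while loop of A; the stack's top is the HEAD of the list (stack.pop() / append = head).
-- The fuel argument only makes the loop total: 200 exceeds any possible number of
-- iterations (the proofs below show the bound 131 suffices), so it never runs out.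
def dfsLoop (grid : List (List String)) : Nat → List (Int × Int) → PySem.Set (Int × Int) → PySem.Set (Int × Int)
  | 0, _, visited => visited
  | _ + 1, [], visited => visited
  | fuel + 1, c :: stack, visited =>
      if PySem.Set.contains visited c then
        dfsLoop grid fuel stack visited
      else
        let visited' := PySem.Set.add visited c
        let stack' := pvDirections.foldl (fun st d =>
          let nx := c.1 + d.1
          let ny := c.2 + d.2
          if decide (0 ≤ nx) && decide (nx < 5) && decide (0 ≤ ny) && decide (ny < 5) then
            -- grid[nx][ny]: in range under Pre_dfs (Python raises IndexError outside)
            if PySem.List.pyGetD (PySem.List.pyGetD grid nx []) ny "" != "O" then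
              (nx, ny) :: st
            else st
          else st) stack
        dfsLoop grid fuel stack' visited'

def dfs (grid : List (List String)) (start : Int × Int) : List (Int × Int) :=
  dfsLoop grid 200 [start] PySem.Set.empty

-- ===== PORT B =====
-- ok(x, y) of Source B: in-bounds and not an obstacle
def pvOk (grid : List (List String)) (x y : Int) : Bool :=
  decide (0 ≤ x) && decide (x < 5) && decide (0 ≤ y) && decide (y < 5) &&
    (PySem.List.pyGetD (PySem.List.pyGetD grid x []) y "" != "O")

-- fill(x, y) of Source B: mark on entry, then four unrolled guarded recursive calls;
-- fuel only makes the recursion total (depth ≤ 27 < 200).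
def fillRec (grid : List (List String)) : Nat → Int × Int → PySem.Set (Int × Int) → PySem.Set (Int × Int)
  | 0, _, visited => visited
  | fuel + 1, (x, y), visited =>
      if PySem.Set.contains visited (x, y) then visited
      else
        let v1 := PySem.Set.add visited (x, y)
        let v2 := if pvOk grid x (y + 1) then fillRec grid fuel (x, y + 1) v1 else v1
        let v3 := if pvOk grid x (y - 1) then fillRec grid fuel (x, y - 1) v2 else v2
        let v4 := if pvOk grid (x + 1) y then fillRec grid fuel (x + 1, y) v3 else v3
        if pvOk grid (x - 1) y then fillRec grid fuel (x - 1, y) v4 else v4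

def dfs_alt (grid : List (List String)) (start : Int × Int) : List (Int × Int) :=
  fillRec grid 200 start PySem.Set.empty

-- ===== PRECONDITION & SPEC =====
-- Pre_ excludes inputs on which the hard-coded gridSize=5 bounds check can send Python's
-- grid[nx][ny] past the actual grid (IndexError): it requires a full 5×5 board prefix,
-- unless start has no neighbour inside the 5×5 area (then the grid is never indexed).
def Pre_dfs (grid : List (List String)) (start : Int × Int) : Prop :=
  (5 ≤ grid.length ∧ ∀ row ∈ grid.take 5, 5 ≤ row.length) ∨
  (∀ d ∈ pvDirections,
    ¬ (0 ≤ start.1 + d.1 ∧ start.1 + d.1 < 5 ∧ 0 ≤ start.2 + d.2 ∧ start.2 + d.2 < 5))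
instance (grid : List (List String)) (start : Int × Int) : Decidable (Pre_dfs grid start) := by
  unfold Pre_dfs; infer_instance

def pvWitness_dfs : List (List String) × (Int × Int) :=
  ([[".", ".", ".", ".", "."], [".", "O", ".", ".", "."], [".", ".", ".", "O", "."],
    [".", ".", ".", ".", "."], ["O", ".", ".", ".", "."]], (0, 0))

def Spec_dfs (grid : List (List String)) (start : Int × Int) (out : List (Int × Int)) : Prop := out = dfs_alt grid start
instance (grid : List (List String)) (start : Int × Int) (out : List (Int × Int)) : Decidable (Spec_dfs grid start out) := by unfold Spec_dfs; infer_instance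

-- ===== CLAIM (what is proved, stated in full; the proofs are below) =====
def Claim_equal_dfs : Prop := ∀ (grid : List (List String)) (start : Int × Int), Dom_dfs grid start → Pre_dfs grid start → Spec_dfs grid start (dfs grid start)

-- ===== LEMMAS AND PROOFS =====

-- the 25 board cells the bounds check admits, and the cells a run can ever visit
def pvBoard : List (Int × Int) :=
  (List.range 5).flatMap (fun i => (List.range 5).map (fun j => ((i : Int), (j : Int))))

def pvCands (start : Int × Int) : List (Int × Int) := start :: pvBoard

-- number of candidate cells not yet visited (the termination/fuel measure)
def pvMissing (start : Int × Int) (v : PySem.Set (Int × Int)) : Nat :=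
  ((pvCands start).filter (fun c => ! PySem.Set.contains v c)).length

lemma pv_mem_board {a b : Int} (h0 : 0 ≤ a) (h1 : a < 5) (h2 : 0 ≤ b) (h3 : b < 5) :
    (a, b) ∈ pvBoard := by
  interval_cases a <;> interval_cases b <;> decide

lemma pv_contains_iff {v : PySem.Set (Int × Int)} {x : Int × Int} :
    PySem.Set.contains v x = true ↔ x ∈ v := by
  simp [PySem.Set.contains]

lemma pv_mem_add {v : PySem.Set (Int × Int)} {c x : Int × Int} (h : x ∈ v) :
    x ∈ PySem.Set.add v c :=
  (PySem.Set.mem_add v c x).mpr (Or.inl h)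

-- BRIDGE: B's unrolled body written as a fold over the reversed direction list
lemma pv_fill_unfold (grid : List (List String)) (f : Nat) (c : Int × Int)
    (v : PySem.Set (Int × Int)) :
    fillRec grid (f + 1) c v
      = if PySem.Set.contains v c then v
        else
          pvDirections.reverse.foldl (fun w d =>
            if pvOk grid (c.1 + d.1) (c.2 + d.2) then
              fillRec grid f (c.1 + d.1, c.2 + d.2) w
            else w) (PySem.Set.add v c) := by
  obtain ⟨x, y⟩ := c
  show fillRec grid (f + 1) (x, y) v = _
  rw [fillRec]
  by_cases hv : PySem.Set.contains v (x, y) = true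
  · rw [if_pos hv, if_pos hv]
  · rw [if_neg hv, if_neg hv]
    simp only [pvDirections, List.reverse, List.reverseAux, List.foldl]
    norm_num [sub_eq_add_neg]

-- definitional unfolding of A's loop body (let-free form)
lemma pv_loop_unfold_cons (grid : List (List String)) (f : Nat) (c : Int × Int)
    (st : List (Int × Int)) (v : PySem.Set (Int × Int)) :
    dfsLoop grid (f + 1) (c :: st) v
      = if PySem.Set.contains v c then dfsLoop grid f st v
        else
          dfsLoop grid f
            (pvDirections.foldl (fun s d =>
              if decide (0 ≤ c.1 + d.1) && decide (c.1 + d.1 < 5) && decide (0 ≤ c.2 + d.2)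
                  && decide (c.2 + d.2 < 5) then
                if PySem.List.pyGetD (PySem.List.pyGetD grid (c.1 + d.1) []) (c.2 + d.2) "" != "O" then
                  (c.1 + d.1, c.2 + d.2) :: s
                else s
              else s) st)
            (PySem.Set.add v c) := rfl

lemma pv_len_filter_mono {α : Type} {l : List α} {p q : α → Bool}
    (h : ∀ x ∈ l, p x = true → q x = true) :
    (l.filter p).length ≤ (l.filter q).length := by
  induction l with
  | nil => simp
  | cons a t ih =>
    have ht := ih (fun x hx => h x (List.mem_cons_of_mem _ hx))
    by_cases hpa : p a = true
    · have hqa := h a (List.mem_cons_self ..) hpa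
      simp [hpa, hqa]; omega
    · cases hqa : q a <;>
        simp [hpa, hqa] <;> omega

lemma pv_len_filter_lt {α : Type} {l : List α} {p q : α → Bool}
    (h : ∀ x ∈ l, p x = true → q x = true) {c : α} (hc : c ∈ l)
    (hq : q c = true) (hp : p c = false) :
    (l.filter p).length < (l.filter q).length := by
  induction l with
  | nil => cases hc
  | cons a t ih =>
    have hmono := pv_len_filter_mono (l := t) (p := p) (q := q)
      (fun x hx => h x (List.mem_cons_of_mem _ hx))
    rcases List.mem_cons.mp hc with rfl | hct
    · simp [hp, hq]; omega
    · have iht := ih (fun x hx => h x (List.mem_cons_of_mem _ hx)) hct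
      by_cases hpa : p a = true
      · have hqa := h a (List.mem_cons_self ..) hpa
        simp [hpa, hqa]; omega
      · cases hqa : q a <;> simp [hpa, hqa] <;> omega

lemma pv_board_len : pvBoard.length = 25 := by decide

lemma pv_missing_le (start : Int × Int) (v : PySem.Set (Int × Int)) :
    pvMissing start v ≤ 26 := by
  unfold pvMissing
  refine le_trans (List.length_filter_le _ _) ?_
  simp [pvCands, pv_board_len]

lemma pv_missing_mono {start : Int × Int} {v w : PySem.Set (Int × Int)}
    (h : ∀ x, x ∈ v → x ∈ w) : pvMissing start w ≤ pvMissing start v := by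
  unfold pvMissing
  refine pv_len_filter_mono ?_
  intro x _ hx
  cases hcv : PySem.Set.contains v x with
  | false => simp
  | true =>
    exfalso
    have hw : PySem.Set.contains w x = true :=
      pv_contains_iff.mpr (h x (pv_contains_iff.mp hcv))
    rw [hw] at hx
    simp at hx

lemma pv_missing_add_lt {start c : Int × Int} {v : PySem.Set (Int × Int)}
    (hc : c ∈ pvCands start) (hv : ¬ c ∈ v) :
    pvMissing start (PySem.Set.add v c) < pvMissing start v := by
  unfold pvMissing
  refine pv_len_filter_lt ?_ hc ?_ ?_
  · intro x _ hx
    cases hcv : PySem.Set.contains v x with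
    | false => simp
    | true =>
      exfalso
      have hw : PySem.Set.contains (PySem.Set.add v c) x = true :=
        pv_contains_iff.mpr (pv_mem_add (pv_contains_iff.mp hcv))
      rw [hw] at hx
      simp at hx
  · cases hvc : PySem.Set.contains v c with
    | false => simp
    | true => exact absurd (pv_contains_iff.mp hvc) hv
  · have hmm : PySem.Set.contains (PySem.Set.add v c) c = true :=
      pv_contains_iff.mpr ((PySem.Set.mem_add v c c).mpr (Or.inr rfl))
    simp [hmm]

lemma pv_foldl_pres {α β : Type} (l : List α) (F : β → α → β) (P : β → Prop)
    (hP : ∀ acc d, P acc → P (F acc d)) :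
    ∀ init, P init → P (l.foldl F init) := by
  induction l with
  | nil => intro init h; simpa using h
  | cons a t ih => intro init h; exact ih _ (hP init a h)

lemma pv_fill_superset (grid : List (List String)) :
    ∀ (fuel : Nat) (c : Int × Int) (v : PySem.Set (Int × Int)) (x : Int × Int),
      x ∈ v → x ∈ fillRec grid fuel c v := by
  intro fuel
  induction fuel with
  | zero => intro c v x hx; exact hx
  | succ f ih =>
    intro c v x hx
    rw [pv_fill_unfold]
    by_cases hcv : PySem.Set.contains v c = true
    · rw [if_pos hcv]; exact hx
    · rw [if_neg hcv]
      refine pv_foldl_pres _ _ (fun w => x ∈ w) ?_ _ (pv_mem_add hx)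
      intro acc d hacc
      dsimp only
      split
      · exact ih _ _ _ hacc
      · exact hacc

lemma pv_missing_fill_le (grid : List (List String)) (start : Int × Int)
    (fuel : Nat) (c : Int × Int) (v : PySem.Set (Int × Int)) :
    pvMissing start (fillRec grid fuel c v) ≤ pvMissing start v :=
  pv_missing_mono (pv_fill_superset grid fuel c v)

lemma pv_foldl_congr_inv {α β : Type} (l : List α) (F G : β → α → β) (P : β → Prop)
    (hP : ∀ acc d, P acc → P (F acc d)) (hEq : ∀ acc d, P acc → F acc d = G acc d) :
    ∀ init, P init → l.foldl F init = l.foldl G init := by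
  induction l with
  | nil => intro init _; rfl
  | cons a t ih =>
    intro init hinit
    simp only [List.foldl_cons]
    rw [← hEq init a hinit]
    exact ih _ (hP init a hinit)

lemma pv_guard_nbr_mem {grid : List (List String)} {start c : Int × Int} (d : Int × Int)
    (hg : pvOk grid (c.1 + d.1) (c.2 + d.2) = true) :
    (c.1 + d.1, c.2 + d.2) ∈ pvCands start := by
  simp only [pvOk, Bool.and_eq_true, decide_eq_true_eq] at hg
  exact List.mem_cons_of_mem _
    (pv_mem_board hg.1.1.1.1 hg.1.1.1.2 hg.1.1.2 hg.1.2)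

lemma pv_fill_stable (grid : List (List String)) (start : Int × Int) :
    ∀ (n f g : Nat) (c : Int × Int) (v : PySem.Set (Int × Int)),
      c ∈ pvCands start → pvMissing start v ≤ n → n < f → n < g →
      fillRec grid f c v = fillRec grid g c v := by
  intro n
  induction n using Nat.strong_induction_on with
  | _ n IH =>
    intro f g c v hc hv hf hg
    obtain ⟨f, rfl⟩ : ∃ f', f = f' + 1 := ⟨f - 1, by omega⟩
    obtain ⟨g, rfl⟩ : ∃ g', g = g' + 1 := ⟨g - 1, by omega⟩
    rw [pv_fill_unfold, pv_fill_unfold]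
    by_cases hcv : PySem.Set.contains v c = true
    · rw [if_pos hcv, if_pos hcv]
    · rw [if_neg hcv, if_neg hcv]
      have hlt : pvMissing start (PySem.Set.add v c) < pvMissing start v :=
        pv_missing_add_lt hc (fun hm => hcv (pv_contains_iff.mpr hm))
      refine pv_foldl_congr_inv _ _ _ (fun w => pvMissing start w ≤ n - 1) ?_ ?_ _ (by omega)
      · intro acc d hacc
        dsimp only
        split
        · exact le_trans (pv_missing_fill_le grid start _ _ _) hacc
        · exact hacc
      · intro acc d hacc
        dsimp only
        split
        · next hgd =>
          exact IH (n - 1) (by omega) f g _ acc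
            (pv_guard_nbr_mem d hgd) hacc (by omega) (by omega)
        · rfl

lemma pv_foldl_guard_cons {α β : Type} (g : α → Bool) (h : α → β) :
    ∀ (l : List α) (st : List β),
      l.foldl (fun s d => if g d then h d :: s else s) st
        = (l.filterMap (fun d => if g d then some (h d) else none)).reverse ++ st := by
  intro l
  induction l with
  | nil => simp
  | cons a t ih =>
    intro st
    by_cases hga : g a = true <;>
      simp [List.foldl_cons, hga, ih]

lemma pv_foldl_guard_filterMap {α β γ : Type} (g : α → Bool) (h : α → β)
    (F : β → γ → γ) :
    ∀ (l : List α) (init : γ),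
      l.foldl (fun v d => if g d then F (h d) v else v) init
        = (l.filterMap (fun d => if g d then some (h d) else none)).foldl (fun v c => F c v) init := by
  intro l
  induction l with
  | nil => intro init; rfl
  | cons a t ih =>
    intro init
    by_cases hga : g a = true <;>
      simp [List.foldl_cons, hga, ih]

set_option maxRecDepth 8192 in
set_option maxHeartbeats 1000000 in
lemma pv_loop_eq (grid : List (List String)) (start : Int × Int) :
    ∀ (N : Nat) (st : List (Int × Int)) (v : PySem.Set (Int × Int)) (fuel : Nat),
      (∀ c ∈ st, c ∈ pvCands start) → 5 * pvMissing start v + st.length ≤ N → N < fuel →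
      dfsLoop grid fuel st v = st.foldl (fun w c => fillRec grid 200 c w) v := by
  intro N
  induction N using Nat.strong_induction_on with
  | _ N IH =>
    intro st v fuel hst hm hf
    obtain ⟨f, rfl⟩ : ∃ f', fuel = f' + 1 := ⟨fuel - 1, by omega⟩
    cases st with
    | nil => rfl
    | cons c st =>
      have hcc : c ∈ pvCands start := hst c (List.mem_cons_self ..)
      have hst' : ∀ x ∈ st, x ∈ pvCands start :=
        fun x hx => hst x (List.mem_cons_of_mem _ hx)
      have hlen : (c :: st).length = st.length + 1 := rfl
      rw [hlen] at hm
      rw [pv_loop_unfold_cons]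
      by_cases hcv : PySem.Set.contains v c = true
      · rw [if_pos hcv]
        rw [IH (N - 1) (by omega) st v f hst' (by omega) (by omega)]
        have h2 : fillRec grid 200 c v = v := by
          rw [show (200 : Nat) = 199 + 1 from rfl, pv_fill_unfold, if_pos hcv]
        rw [List.foldl_cons, h2]
      · rw [if_neg hcv]
        have hmlt : pvMissing start (PySem.Set.add v c) < pvMissing start v :=
          pv_missing_add_lt hcc (fun hm' => hcv (pv_contains_iff.mpr hm'))
        -- A's nested-if push step, with the guard collected into pvOk
        have hstep : pvDirections.foldl (fun s d =>
              if decide (0 ≤ c.1 + d.1) && decide (c.1 + d.1 < 5) && decide (0 ≤ c.2 + d.2)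
                  && decide (c.2 + d.2 < 5) then
                if PySem.List.pyGetD (PySem.List.pyGetD grid (c.1 + d.1) []) (c.2 + d.2) "" != "O" then
                  (c.1 + d.1, c.2 + d.2) :: s
                else s
              else s) st
            = pvDirections.foldl (fun s d =>
                if pvOk grid (c.1 + d.1) (c.2 + d.2) then
                  (c.1 + d.1, c.2 + d.2) :: s
                else s) st := by
          refine PySem.List.foldl_congr_mem _ _ _ _ ?_
          intro s d _
          by_cases hb : (decide (0 ≤ c.1 + d.1) && decide (c.1 + d.1 < 5) && decide (0 ≤ c.2 + d.2)
              && decide (c.2 + d.2 < 5)) = true <;>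
            by_cases ho : (PySem.List.pyGetD (PySem.List.pyGetD grid (c.1 + d.1) []) (c.2 + d.2) "" != "O") = true <;>
            simp [pvOk, hb, ho, Bool.and_assoc]
        have hnbs := pv_foldl_guard_cons
          (g := fun d => pvOk grid (c.1 + d.1) (c.2 + d.2))
          (h := fun d => (c.1 + d.1, c.2 + d.2)) pvDirections st
        set nbs := pvDirections.filterMap (fun d =>
          if pvOk grid (c.1 + d.1) (c.2 + d.2) then
            some (c.1 + d.1, c.2 + d.2)
          else none) with hnbsdef
        have hnbs_mem : ∀ x ∈ nbs, x ∈ pvCands start := by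
          intro x hx
          rw [hnbsdef] at hx
          obtain ⟨d, _, hd⟩ := List.mem_filterMap.mp hx
          by_cases hgd : pvOk grid (c.1 + d.1) (c.2 + d.2) = true
          · rw [if_pos hgd] at hd
            cases hd
            exact pv_guard_nbr_mem d hgd
          · rw [if_neg hgd] at hd
            cases hd
        have hnbs_len : nbs.length ≤ 4 := by
          rw [hnbsdef]
          exact le_trans (List.length_filterMap_le _ _) (by decide)
        rw [hstep, hnbs]
        have hl : (nbs.reverse ++ st).length = nbs.length + st.length := by
          simp
        rw [IH (N - 1) (by omega) (nbs.reverse ++ st) (PySem.Set.add v c) f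
          (by
            intro x hx
            rcases List.mem_append.mp hx with hx | hx
            · exact hnbs_mem x (List.mem_reverse.mp hx)
            · exact hst' x hx)
          (by rw [hl]; omega)
          (by omega)]
        rw [List.foldl_append, List.foldl_cons]
        congr 1
        -- fillRec 200 c v equals folding fills over the pushed neighbours
        conv_rhs => rw [show (200 : Nat) = 199 + 1 from rfl, pv_fill_unfold, if_neg hcv]
        rw [pv_foldl_guard_filterMap
          (g := fun d => pvOk grid (c.1 + d.1) (c.2 + d.2))
          (h := fun d => (c.1 + d.1, c.2 + d.2)) (F := fillRec grid 199) pvDirections.reverse _]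
        rw [List.filterMap_reverse, ← hnbsdef]
        refine PySem.List.foldl_congr_mem _ _ _ _ ?_
        intro acc x hx
        exact pv_fill_stable grid start 26 200 199 x acc
          (hnbs_mem x (List.mem_reverse.mp hx)) (pv_missing_le start acc)
          (by omega) (by omega)

-- ===== VERDICT (by name: the statement is the Claim_ definition above) =====
theorem dfs_spec : Claim_equal_dfs := by
  intro grid start _ _
  unfold Spec_dfs dfs dfs_alt
  have h := pv_loop_eq grid start 131 [start] PySem.Set.empty 200
    (by intro c hc; rw [List.mem_singleton] at hc; rw [hc]; exact List.mem_cons_self ..)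
    (by simp only [List.length_cons, List.length_nil]; have := pv_missing_le start PySem.Set.empty; omega)
    (by omega)
  exact h
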